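-- pv_equiv track=rewrite | github.com/AlainCoserariu/slither-link-python | solveur.py | trouver_premier_sommet
-- ===== SOURCE A (Python) =====
-- def trouver_premier_sommet(indice, sommet_faux):
--     """
--     Trouve un premier sommet intéressant pour commencé à résoudre la grille.
--     Par exemple un sommet autour d'un 3 est forcément intéressant cor
--     obligatoirement relié à un segment qui fait partie de la solution.
--
--     :param indice: tableau d'indice allant de 0 à trois ou ne donnant pas de
--     renseignement
--     :param sommet_faux: Liste des sommets qui ne font pas partie de la solution
--     :return: sommet
--
--     >>> indice = [\
--     [None, None, None, None, None],\
--     [2, 2, None, None, 3],\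
--     [2, 1, None, 0, 3],\
--     [None, None, 2, 0, None],\
--     [2, 2, 2, 2, None],\
--     ]
--     >>> trouver_premier_sommet(indice, [])
--     (4, 1)
--     """
--     for i in range(3, 0, -1):
--         for y in range(len(indice)):
--             for x in range(len(indice[y])):
--                 if indice[y][x] == i:
--                     liste_sommet_case = [(x, y),
--                                          (x + 1, y),
--                                          (x, y + 1),
--                                          (x + 1, y + 1)]
--                     for sommet in liste_sommet_case:
--                         if sommet not in sommet_faux:
--                             return sommet
-- ===== SOURCE B (Python) =====
-- def trouver_premier_sommet(indice, sommet_faux):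
--     # One row-major pass; best[v] = first free vertex among cells of value v.
--     best = {3: None, 2: None, 1: None}
--     for y, ligne in enumerate(indice):
--         for x, v in enumerate(ligne):
--             if v in best and best[v] is None:
--                 for sommet in ((x, y), (x + 1, y), (x, y + 1), (x + 1, y + 1)):
--                     if sommet not in sommet_faux:
--                         best[v] = sommet
--                         break
--     for i in (3, 2, 1):
--         if best[i] is not None:
--             return best[i]
-- ===== Notes on version B (the rewrite author's own statement) =====
-- stated objective: alternative
-- what changed: A scans the whole grid up to three times (once per clue value 3,2,1); B does a single row-major pass maintaining a dict of the first free vertex per clue value and picks 3-then-2-then-1 afterwards.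
-- outside the precondition, e.g. on trouver_premier_sommet([[None]], []): A returns None, B returns None; on trouver_premier_sommet([[3]], [(0, 0), (1, 0), (0, 1), (1, 1)]): A returns None, B returns None
import Mathlib
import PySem

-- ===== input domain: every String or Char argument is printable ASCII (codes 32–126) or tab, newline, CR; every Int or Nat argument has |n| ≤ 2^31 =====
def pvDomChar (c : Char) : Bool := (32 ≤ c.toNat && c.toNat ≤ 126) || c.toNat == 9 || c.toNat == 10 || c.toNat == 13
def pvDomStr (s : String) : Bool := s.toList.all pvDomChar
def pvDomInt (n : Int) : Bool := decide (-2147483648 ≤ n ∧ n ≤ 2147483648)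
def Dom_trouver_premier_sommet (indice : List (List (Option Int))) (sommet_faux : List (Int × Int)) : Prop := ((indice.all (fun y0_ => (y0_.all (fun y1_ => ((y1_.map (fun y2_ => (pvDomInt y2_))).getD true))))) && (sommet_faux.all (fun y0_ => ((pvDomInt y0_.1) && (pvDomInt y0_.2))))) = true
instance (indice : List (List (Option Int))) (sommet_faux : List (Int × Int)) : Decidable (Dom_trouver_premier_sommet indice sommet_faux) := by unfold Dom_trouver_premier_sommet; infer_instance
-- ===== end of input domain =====

-- B replaces A's three full grid scans (one per clue value 3,2,1) by a single row-major
-- pass keeping the first free vertex found per clue value; return value only, no mutation.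

-- ===== PORT A =====
-- 'for sommet in liste_sommet_case: if sommet not in sommet_faux: return sommet'
def pvFreeA (sf : List (Int × Int)) (x y : Int) : Option (Int × Int) :=
  [(x, y), (x + 1, y), (x, y + 1), (x + 1, y + 1)].find? (fun s => !sf.contains s)

-- inner 'for x in range(len(indice[y]))' loop of A, for a fixed clue value i
def pvRowA (sf : List (Int × Int)) (i : Int) (row : List (Option Int)) (x y : Int) :
    Option (Int × Int) :=
  match row with
  | [] => none
  | c :: rest =>
    if c = some i then
      match pvFreeA sf x y with
      | some s => some s
      | none => pvRowA sf i rest (x + 1) y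
    else pvRowA sf i rest (x + 1) y

-- middle 'for y in range(len(indice))' loop of A
def pvGridA (sf : List (Int × Int)) (i : Int) (rows : List (List (Option Int))) (y : Int) :
    Option (Int × Int) :=
  match rows with
  | [] => none
  | r :: rest =>
    match pvRowA sf i r 0 y with
    | some s => some s
    | none => pvGridA sf i rest (y + 1)

-- outer 'for i in range(3, 0, -1)' loop of A
def pvILoopA (sf : List (Int × Int)) (indice : List (List (Option Int))) (is_ : List Int) :
    Option (Int × Int) :=
  match is_ with
  | [] => none
  | i :: rest =>
    match pvGridA sf i indice 0 with
    | some s => some s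
    | none => pvILoopA sf indice rest

-- Python A returns None (no result) when no clue 1/2/3 has a free vertex; that case is
-- outside Pre_ below and the port returns (0, 0) there.
def trouver_premier_sommet (indice : List (List (Option Int))) (sommet_faux : List (Int × Int)) : Int × Int :=
  (pvILoopA sommet_faux indice [3, 2, 1]).getD (0, 0)

-- ===== PORT B =====
-- the inner vertex scan of Source B ('for sommet in (...): if sommet not in sommet_faux: best[v] = sommet; break')
def pvFreeB (sf : List (Int × Int)) (x y : Int) : Option (Int × Int) :=
  [(x, y), (x + 1, y), (x, y + 1), (x + 1, y + 1)].find? (fun s => !sf.contains s)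

-- per-cell update of the dict best = {3: _, 2: _, 1: _} (as a triple b3, b2, b1)
def pvStepB (sf : List (Int × Int)) (st : Option (Int × Int) × Option (Int × Int) × Option (Int × Int))
    (c : Option Int) (x y : Int) :
    Option (Int × Int) × Option (Int × Int) × Option (Int × Int) :=
  match st with
  | (b3, b2, b1) =>
    if c = some 3 then
      (match b3 with | some s => some s | none => pvFreeB sf x y, b2, b1)
    else if c = some 2 then
      (b3, match b2 with | some s => some s | none => pvFreeB sf x y, b1)
    else if c = some 1 then
      (b3, b2, match b1 with | some s => some s | none => pvFreeB sf x y)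
    else st

-- 'for x, v in enumerate(ligne)'
def pvRowB (sf : List (Int × Int)) (row : List (Option Int)) (x y : Int)
    (st : Option (Int × Int) × Option (Int × Int) × Option (Int × Int)) :
    Option (Int × Int) × Option (Int × Int) × Option (Int × Int) :=
  match row with
  | [] => st
  | c :: rest => pvRowB sf rest (x + 1) y (pvStepB sf st c x y)

-- 'for y, ligne in enumerate(indice)'
def pvGridB (sf : List (Int × Int)) (rows : List (List (Option Int))) (y : Int)
    (st : Option (Int × Int) × Option (Int × Int) × Option (Int × Int)) :
    Option (Int × Int) × Option (Int × Int) × Option (Int × Int) :=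
  match rows with
  | [] => st
  | r :: rest => pvGridB sf rest (y + 1) (pvRowB sf r 0 y st)

-- final 'for i in (3, 2, 1): if best[i] is not None: return best[i]'; (0,0) outside Pre_
def trouver_premier_sommet_alt (indice : List (List (Option Int))) (sommet_faux : List (Int × Int)) : Int × Int :=
  match pvGridB sommet_faux indice 0 (none, none, none) with
  | (b3, b2, b1) =>
    match b3 with
    | some s => s
    | none =>
      match b2 with
      | some s => s
      | none =>
        match b1 with
        | some s => s
        | none => (0, 0)

-- ===== PRECONDITION & SPEC =====
-- Pre_ excludes exactly the inputs on which Python A falls off the end and returns None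
-- (no value of the declared tuple type): grids where no cell valued 1, 2 or 3 has one of
-- its four vertices outside sommet_faux.  B returns None there too.
def Pre_trouver_premier_sommet (indice : List (List (Option Int))) (sommet_faux : List (Int × Int)) : Prop :=
  ∃ yr ∈ PySem.List.enumerate indice 0, ∃ xc ∈ PySem.List.enumerate yr.2 0,
    (xc.2 = some 1 ∨ xc.2 = some 2 ∨ xc.2 = some 3) ∧
    ∃ s ∈ [(xc.1, yr.1), (xc.1 + 1, yr.1), (xc.1, yr.1 + 1), (xc.1 + 1, yr.1 + 1)],
      s ∉ sommet_faux
instance (indice : List (List (Option Int))) (sommet_faux : List (Int × Int)) : Decidable (Pre_trouver_premier_sommet indice sommet_faux) := by unfold Pre_trouver_premier_sommet; infer_instance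

def pvWitness_trouver_premier_sommet : List (List (Option Int)) × (List (Int × Int)) :=
  ([[none, some 2], [some 3, some 0]], [(0, 1)])

def Spec_trouver_premier_sommet (indice : List (List (Option Int))) (sommet_faux : List (Int × Int)) (out : Int × Int) : Prop := out = trouver_premier_sommet_alt indice sommet_faux
instance (indice : List (List (Option Int))) (sommet_faux : List (Int × Int)) (out : Int × Int) : Decidable (Spec_trouver_premier_sommet indice sommet_faux out) := by unfold Spec_trouver_premier_sommet; infer_instance

-- ===== CLAIM (what is proved, stated in full; the proofs are below) =====
def Claim_equal_trouver_premier_sommet : Prop := ∀ (indice : List (List (Option Int))) (sommet_faux : List (Int × Int)), Dom_trouver_premier_sommet indice sommet_faux → Pre_trouver_premier_sommet indice sommet_faux → Spec_trouver_premier_sommet indice sommet_faux (trouver_premier_sommet indice sommet_faux)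

-- ===== LEMMAS AND PROOFS =====

theorem pvFreeB_eq (sf : List (Int × Int)) (x y : Int) : pvFreeB sf x y = pvFreeA sf x y := rfl

-- row invariant: B's pass over one row extends each slot by A's scan of that row for its value
theorem pvRowB_eq (sf : List (Int × Int)) (row : List (Option Int)) (x y : Int)
    (b3 b2 b1 : Option (Int × Int)) :
    pvRowB sf row x y (b3, b2, b1) =
      (b3.orElse (fun _ => pvRowA sf 3 row x y),
       b2.orElse (fun _ => pvRowA sf 2 row x y),
       b1.orElse (fun _ => pvRowA sf 1 row x y)) := by
  induction row generalizing x b3 b2 b1 with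
  | nil => simp [pvRowB, pvRowA]
  | cons c rest ih =>
    simp only [pvRowB, pvStepB, pvRowA, pvFreeB_eq]
    by_cases h3 : c = some 3 <;> by_cases h2 : c = some 2 <;> by_cases h1 : c = some 1 <;>
      simp [h3, h2, h1, ih] <;>
      cases b3 <;> cases b2 <;> cases b1 <;>
      cases hf : pvFreeA sf x y <;> simp

-- grid invariant
theorem pvGridB_eq (sf : List (Int × Int)) (rows : List (List (Option Int))) (y : Int)
    (b3 b2 b1 : Option (Int × Int)) :
    pvGridB sf rows y (b3, b2, b1) =
      (b3.orElse (fun _ => pvGridA sf 3 rows y),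
       b2.orElse (fun _ => pvGridA sf 2 rows y),
       b1.orElse (fun _ => pvGridA sf 1 rows y)) := by
  induction rows generalizing y b3 b2 b1 with
  | nil => simp [pvGridB, pvGridA]
  | cons r rest ih =>
    simp only [pvGridB, pvGridA, pvRowB_eq, ih]
    cases b3 <;> cases b2 <;> cases b1 <;>
      cases h3 : pvRowA sf 3 r 0 y <;> cases h2 : pvRowA sf 2 r 0 y <;>
      cases h1 : pvRowA sf 1 r 0 y <;> simp

theorem ab_eq (indice : List (List (Option Int))) (sf : List (Int × Int)) :
    trouver_premier_sommet indice sf = trouver_premier_sommet_alt indice sf := by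
  simp only [trouver_premier_sommet, trouver_premier_sommet_alt, pvGridB_eq, pvILoopA]
  cases pvGridA sf 3 indice 0 <;> cases pvGridA sf 2 indice 0 <;>
    cases pvGridA sf 1 indice 0 <;> rfl

-- ===== VERDICT (by name: the statement is the Claim_ definition above) =====
theorem trouver_premier_sommet_spec : Claim_equal_trouver_premier_sommet := by
  intro indice sf _ _
  exact ab_eq indice sf
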